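-- pv_equiv track=rewrite | github.com/Menoz2000/cyber_challenge | programming_test_2024/subset_count/subset_count.py | find_max_combination
-- ===== SOURCE A (Python) =====
-- def find_max_combination(s, d):
--     def esplora(i, A, B):
--
--         #caso base, tutti gli elementi sono stati esplorati
--         if i == len(s):
--             return len(A)+len(B)
--
--         #prendo l'elemento corrente
--         elem = s[i]
--         max_dim = 0
--
--         #provo ad aggiungere l'eemento ad A
--         if all(abs(elem - x) <= d for x in A):
--             max_dim = max(max_dim, esplora(i + 1, A + [elem], B))
--
--         #provo ad aggiungere l'eemento ad A
--         if all(abs(elem - x) <= d for x in B):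
--             max_dim = max(max_dim, esplora(i + 1, A, B + [elem]))
--
--         #provo a non usare l'elemento corrente
--         max_dim = max(max_dim, esplora(i + 1, A, B))
--
--         return max_dim
--
--     return esplora(0, [], [])
-- ===== SOURCE B (Python) =====
-- def find_max_combination(s, d):
--     # Polynomial DP instead of A's exponential three-way recursion.
--     # A group of already-chosen elements only matters through the interval of
--     # values that may still join it: [max(group)-d, min(group)+d] (None = empty
--     # group, anything may join).  Scan s once, keeping a dict from the pair of
--     # group-intervals to the best count achieving it; each element either joins
--     # group A, joins group B, or is skipped.
--     states = {(None, None): 0}   # (intervalA, intervalB) -> max elements placed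
--     for e in s:
--         new = dict(states)       # skipping e keeps every state
--         for (sa, sb), c in states.items():
--             ta = _join(sa, e, d)
--             if ta is not None:
--                 if new.get((ta, sb), -1) < c + 1:
--                     new[(ta, sb)] = c + 1
--             tb = _join(sb, e, d)
--             if tb is not None:
--                 if new.get((sa, tb), -1) < c + 1:
--                     new[(sa, tb)] = c + 1
--         states = new
--     return max(states.values())
--
-- def _join(st, e, d):
--     # interval of values allowed in the group after e joins, or None if e cannot join
--     if st is None:
--         return (e - d, e + d)
--     lo, hi = st
--     if lo <= e <= hi:
--         return (max(lo, e - d), min(hi, e + d))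
--     return None
-- ===== Notes on version B (the rewrite author's own statement) =====
-- stated objective: faster
-- what changed: A's exponential three-way recursion over the explicit contents of both groups is replaced by a single left-to-right pass keeping a dict from compressed states (the interval of values each group can still accept) to the best count, merging states by max, so the state space is polynomial instead of exponential.
import Mathlib
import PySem

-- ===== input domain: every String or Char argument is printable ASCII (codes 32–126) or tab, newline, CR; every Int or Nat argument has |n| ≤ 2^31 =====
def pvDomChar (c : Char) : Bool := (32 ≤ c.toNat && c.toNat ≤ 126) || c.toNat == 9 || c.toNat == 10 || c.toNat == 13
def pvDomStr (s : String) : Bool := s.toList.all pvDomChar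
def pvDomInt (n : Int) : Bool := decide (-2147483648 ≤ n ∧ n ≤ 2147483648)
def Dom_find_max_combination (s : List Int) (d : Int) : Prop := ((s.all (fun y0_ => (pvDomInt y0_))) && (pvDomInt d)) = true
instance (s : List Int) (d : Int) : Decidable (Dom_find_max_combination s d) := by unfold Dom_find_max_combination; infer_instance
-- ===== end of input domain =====

-- B replaces A's exponential three-way recursion over explicit groups by a one-pass
-- polynomial DP over compressed states (the interval of values each group can still
-- accept), keyed in a dict; objective: faster (asymptotic).

-- ===== PORT A =====
-- Port of A's inner recursion `esplora`.  Python tests `i == len(s)` and reads `s[i]`;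
-- every call has i ≤ len(s), so the test is written `len(s) ≤ i` (for termination) and
-- `s[i]` is `s.getD i 0` (always in range when reached) — identical on every reachable call.
def esplora (s : List Int) (d : Int) (i : Nat) (A B : List Int) : Int :=
  if _h : s.length ≤ i then (A.length : Int) + (B.length : Int)
  else
    let elem := s.getD i 0
    let max_dim : Int := 0
    let max_dim := if A.all (fun x => decide (|elem - x| ≤ d)) then
        max max_dim (esplora s d (i+1) (A ++ [elem]) B) else max_dim
    let max_dim := if B.all (fun x => decide (|elem - x| ≤ d)) then
        max max_dim (esplora s d (i+1) A (B ++ [elem])) else max_dim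
    max max_dim (esplora s d (i+1) A B)
termination_by s.length - i
decreasing_by all_goals omega

def find_max_combination (s : List Int) (d : Int) : Int := esplora s d 0 [] []

-- ===== PORT B =====
-- `_join(st, e, d)` of Source B
def pyJoin (st : Option (Int × Int)) (e d : Int) : Option (Int × Int) :=
  match st with
  | none => some (e - d, e + d)
  | some (lo, hi) => if lo ≤ e ∧ e ≤ hi then some (max lo (e - d), min hi (e + d)) else none

-- the guarded `if new.get(key, -1) < c + 1: new[key] = c + 1`
def condIns (nw : PySem.Dict (Option (Int × Int) × Option (Int × Int)) Int)
    (k : Option (Int × Int) × Option (Int × Int)) (v : Int) :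
    PySem.Dict (Option (Int × Int) × Option (Int × Int)) Int :=
  if nw.getD k (-1) < v then nw.insert k v else nw

-- body of the inner `for (sa, sb), c in states.items()` loop
def stepItem (d e : Int) (nw : PySem.Dict (Option (Int × Int) × Option (Int × Int)) Int)
    (p : (Option (Int × Int) × Option (Int × Int)) × Int) :
    PySem.Dict (Option (Int × Int) × Option (Int × Int)) Int :=
  let nw1 := match pyJoin p.1.1 e d with
    | some ta => condIns nw (some ta, p.1.2) (p.2 + 1)
    | none => nw
  match pyJoin p.1.2 e d with
    | some tb => condIns nw1 (p.1.1, some tb) (p.2 + 1)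
    | none => nw1

-- body of the outer `for e in s` loop: `new = dict(states)` then the item loop
def stepOuter (d : Int) (states : PySem.Dict (Option (Int × Int) × Option (Int × Int)) Int)
    (e : Int) : PySem.Dict (Option (Int × Int) × Option (Int × Int)) Int :=
  states.items.foldl (stepItem d e) states

def find_max_combination_alt (s : List Int) (d : Int) : Int :=
  let states := s.foldl (stepOuter d) (PySem.Dict.ofList [((none, none), 0)])
  -- Python's max(states.values()) raises only on an empty dict; `states` always keeps
  -- its initial key, so the `.getD 0` default is never used
  (PySem.List.max? states.values id).getD 0

-- ===== PRECONDITION & SPEC =====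
def Spec_find_max_combination (s : List Int) (d : Int) (out : Int) : Prop := out = find_max_combination_alt s d
instance (s : List Int) (d : Int) (out : Int) : Decidable (Spec_find_max_combination s d out) := by unfold Spec_find_max_combination; infer_instance

-- ===== CLAIM (what is proved, stated in full; the proofs are below) =====
def Claim_equal_find_max_combination : Prop := ∀ (s : List Int) (d : Int), Dom_find_max_combination s d → Spec_find_max_combination s d (find_max_combination s d)

-- ===== LEMMAS AND PROOFS =====

-- The common value: max number of elements of `r` placeable into two groups whose
-- remaining admissible-value intervals are `sa`, `sb` (none = empty group).
def EvJ (d : Int) : List Int → Option (Int × Int) → Option (Int × Int) → Int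
  | [], _, _ => 0
  | e :: r, sa, sb =>
    let m1 : Int := match pyJoin sa e d with
      | some ta => max 0 (1 + EvJ d r (some ta) sb)
      | none => 0
    let m2 : Int := match pyJoin sb e d with
      | some tb => max m1 (1 + EvJ d r sa (some tb))
      | none => m1
    max m2 (EvJ d r sa sb)

theorem EvJ_nonneg (d : Int) (r : List Int) (sa sb : Option (Int × Int)) : 0 ≤ EvJ d r sa sb := by
  induction r generalizing sa sb with
  | nil => simp [EvJ]
  | cons e r ih => rw [EvJ]; exact le_trans (ih sa sb) (le_max_right _ _)

theorem EvJ_cons_skip (d e : Int) (r : List Int) (sa sb : Option (Int × Int)) :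
    EvJ d r sa sb ≤ EvJ d (e :: r) sa sb := by
  rw [EvJ]; exact le_max_right _ _

theorem EvJ_cons_joinA (d e : Int) (r : List Int) (sa sb : Option (Int × Int)) (ta : Int × Int)
    (h : pyJoin sa e d = some ta) : 1 + EvJ d r (some ta) sb ≤ EvJ d (e :: r) sa sb := by
  rw [EvJ]
  cases hb : pyJoin sb e d <;> simp only [h] <;> omega

theorem EvJ_cons_joinB (d e : Int) (r : List Int) (sa sb : Option (Int × Int)) (tb : Int × Int)
    (h : pyJoin sb e d = some tb) : 1 + EvJ d r sa (some tb) ≤ EvJ d (e :: r) sa sb := by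
  rw [EvJ]
  cases ha : pyJoin sa e d <;> simp only [h] <;> omega

theorem EvJ_cons_le (d e : Int) (r : List Int) (sa sb : Option (Int × Int)) (c M : Int)
    (h0 : c + EvJ d r sa sb ≤ M)
    (hA : ∀ ta, pyJoin sa e d = some ta → c + 1 + EvJ d r (some ta) sb ≤ M)
    (hB : ∀ tb, pyJoin sb e d = some tb → c + 1 + EvJ d r sa (some tb) ≤ M) :
    c + EvJ d (e :: r) sa sb ≤ M := by
  have hnn := EvJ_nonneg d r sa sb
  rw [EvJ]
  cases ha : pyJoin sa e d with
  | none =>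
    cases hb : pyJoin sb e d with
    | none => dsimp only; omega
    | some tb =>
      have := hB tb hb; have := EvJ_nonneg d r sa (some tb); dsimp only; omega
  | some ta =>
    have hA' := hA ta ha
    have hnnA := EvJ_nonneg d r (some ta) sb
    cases hb : pyJoin sb e d with
    | none => dsimp only; omega
    | some tb =>
      have := hB tb hb; have := EvJ_nonneg d r sa (some tb); dsimp only; omega

-- `st` represents the set of already-chosen elements `A`
def RepSt (d : Int) (A : List Int) (st : Option (Int × Int)) : Prop :=
  ∀ e : Int, (A.all (fun x => decide (|e - x| ≤ d))) = (pyJoin st e d).isSome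

theorem isSome_ite (c : Prop) [Decidable c] (x : Int × Int) :
    (if c then some x else none).isSome = decide c := by
  split_ifs with h <;> simp [h]

theorem RepSt_nil (d : Int) : RepSt d [] none := by
  intro e; simp [pyJoin]

theorem RepSt_snoc (d : Int) (A : List Int) (st : Option (Int × Int)) (t : Int × Int) (e : Int)
    (hR : RepSt d A st) (h : pyJoin st e d = some t) : RepSt d (A ++ [e]) (some t) := by
  intro e'
  have hR' := hR e'
  cases st with
  | none =>
    simp only [pyJoin, Option.some.injEq] at h
    subst h
    simp only [List.all_append, List.all_cons, List.all_nil, Bool.and_true, hR', pyJoin,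
      Option.isSome_some, Bool.true_and, isSome_ite]
    exact decide_eq_decide.mpr (by rw [abs_le]; omega)
  | some p =>
    obtain ⟨lo, hi⟩ := p
    by_cases hc : lo ≤ e ∧ e ≤ hi
    · simp only [pyJoin, if_pos hc, Option.some.injEq] at h
      subst h
      simp only [pyJoin, isSome_ite] at hR' ⊢
      simp only [List.all_append, List.all_cons, List.all_nil, Bool.and_true, hR']
      rw [← Bool.decide_and]
      exact decide_eq_decide.mpr (by rw [abs_le]; constructor <;> intro <;>
        simp only [max_le_iff, le_min_iff] at * <;> omega)
    · simp [pyJoin, if_neg hc] at h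

theorem esplora_eq (s : List Int) (d : Int) :
    ∀ (i : Nat) (A B : List Int) (sa sb : Option (Int × Int)),
      RepSt d A sa → RepSt d B sb →
      esplora s d i A B = A.length + B.length + EvJ d (s.drop i) sa sb := by
  suffices key : ∀ (n i : Nat) (A B : List Int) (sa sb : Option (Int × Int)),
      s.length - i ≤ n → RepSt d A sa → RepSt d B sb →
      esplora s d i A B = A.length + B.length + EvJ d (s.drop i) sa sb by
    intro i A B sa sb ha hb
    exact key (s.length - i) i A B sa sb le_rfl ha hb
  intro n
  induction n with
  | zero =>
    intro i A B sa sb hn ha hb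
    have hle : s.length ≤ i := by omega
    rw [esplora, dif_pos hle, List.drop_eq_nil_of_le hle]
    simp [EvJ]
  | succ n ih =>
    intro i A B sa sb hn ha hb
    by_cases hle : s.length ≤ i
    · rw [esplora, dif_pos hle, List.drop_eq_nil_of_le hle]
      simp [EvJ]
    · have hlt : i < s.length := by omega
      have hnn : s.length - (i + 1) ≤ n := by omega
      rw [esplora, dif_neg hle, List.drop_eq_getElem_cons hlt, EvJ]
      have hgd : s.getD i 0 = s[i] := List.getD_eq_getElem s 0 hlt
      simp only []
      rw [hgd]
      have haE := ha s[i]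
      have hbE := hb s[i]
      have hskip := ih (i + 1) A B sa sb hnn ha hb
      have h0 := EvJ_nonneg d (s.drop (i + 1)) sa sb
      cases hJA : pyJoin sa s[i] d with
      | none =>
        rw [hJA] at haE; simp only [Option.isSome_none] at haE
        cases hJB : pyJoin sb s[i] d with
        | none =>
          rw [hJB] at hbE; simp only [Option.isSome_none] at hbE
          simp only [haE, hbE, Bool.false_eq_true, if_false]
          rw [hskip]
          omega
        | some tb =>
          rw [hJB] at hbE; simp only [Option.isSome_some] at hbE
          have hB := ih (i + 1) A (B ++ [s[i]]) sa (some tb) hnn ha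
            (RepSt_snoc d B sb tb s[i] hb hJB)
          have h2 := EvJ_nonneg d (s.drop (i + 1)) sa (some tb)
          simp only [haE, hbE, Bool.false_eq_true, if_false, if_true]
          rw [hskip, hB]
          simp only [List.length_append, List.length_cons, List.length_nil]
          push_cast
          omega
      | some ta =>
        rw [hJA] at haE; simp only [Option.isSome_some] at haE
        have hA := ih (i + 1) (A ++ [s[i]]) B (some ta) sb hnn
          (RepSt_snoc d A sa ta s[i] ha hJA) hb
        have h1 := EvJ_nonneg d (s.drop (i + 1)) (some ta) sb
        cases hJB : pyJoin sb s[i] d with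
        | none =>
          rw [hJB] at hbE; simp only [Option.isSome_none] at hbE
          simp only [haE, hbE, Bool.false_eq_true, if_false, if_true]
          rw [hskip, hA]
          simp only [List.length_append, List.length_cons, List.length_nil]
          push_cast
          omega
        | some tb =>
          rw [hJB] at hbE; simp only [Option.isSome_some] at hbE
          have hB := ih (i + 1) A (B ++ [s[i]]) sa (some tb) hnn ha
            (RepSt_snoc d B sb tb s[i] hb hJB)
          have h2 := EvJ_nonneg d (s.drop (i + 1)) sa (some tb)
          simp only [haE, hbE, if_true]
          rw [hskip, hA, hB]
          simp only [List.length_append, List.length_cons, List.length_nil]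
          push_cast
          omega

-- valuation of a dict snapshot against remaining input (fold of max over items)
def bestF (g : Option (Int × Int) × Option (Int × Int) → Int) (m : Int)
    (l : List ((Option (Int × Int) × Option (Int × Int)) × Int)) : Int :=
  l.foldl (fun acc p => max acc (p.2 + g p.1)) m

theorem le_bestF_init (g : Option (Int × Int) × Option (Int × Int) → Int) (m : Int)
    (l : List ((Option (Int × Int) × Option (Int × Int)) × Int)) : m ≤ bestF g m l := by
  induction l generalizing m with
  | nil => exact le_rfl
  | cons p l ih => exact le_trans (le_max_left _ _) (ih (max m (p.2 + g p.1)))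

theorem le_bestF_mem (g : Option (Int × Int) × Option (Int × Int) → Int) (m : Int)
    (l : List ((Option (Int × Int) × Option (Int × Int)) × Int))
    (p : (Option (Int × Int) × Option (Int × Int)) × Int) (hp : p ∈ l) :
    p.2 + g p.1 ≤ bestF g m l := by
  induction l generalizing m with
  | nil => cases hp
  | cons q l ih =>
    rcases List.mem_cons.mp hp with h | h
    · subst h
      exact le_trans (le_max_right _ _) (le_bestF_init g _ l)
    · exact ih _ h

theorem bestF_le_of (g : Option (Int × Int) × Option (Int × Int) → Int) (m M : Int)
    (l : List ((Option (Int × Int) × Option (Int × Int)) × Int))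
    (h : ∀ p ∈ l, p.2 + g p.1 ≤ M) (hm : m ≤ M) : bestF g m l ≤ M := by
  induction l generalizing m with
  | nil => exact hm
  | cons p l ih =>
    apply ih
    · exact fun q hq => h q (List.mem_cons_of_mem _ hq)
    · exact max_le hm (h p (List.mem_cons_self))

theorem le_getD_condIns (nw : PySem.Dict (Option (Int × Int) × Option (Int × Int)) Int)
    (k k' : Option (Int × Int) × Option (Int × Int)) (v : Int) :
    nw.getD k' (-1) ≤ (condIns nw k v).getD k' (-1) := by
  unfold condIns
  split_ifs with hg
  · rw [PySem.Dict.getD_insert]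
    split_ifs with hk
    · subst hk; omega
    · exact le_rfl
  · exact le_rfl

theorem getD_condIns_self (nw : PySem.Dict (Option (Int × Int) × Option (Int × Int)) Int)
    (k : Option (Int × Int) × Option (Int × Int)) (v : Int) :
    v ≤ (condIns nw k v).getD k (-1) := by
  unfold condIns
  split_ifs with hg
  · rw [PySem.Dict.getD_insert, if_pos rfl]
  · omega

theorem nodup_condIns (nw : PySem.Dict (Option (Int × Int) × Option (Int × Int)) Int)
    (k : Option (Int × Int) × Option (Int × Int)) (v : Int) (h : nw.keys.Nodup) :
    (condIns nw k v).keys.Nodup := by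
  unfold condIns
  split_ifs with hg
  · exact PySem.Dict.nodup_keys_insert nw k v h
  · exact h

theorem mem_items_condIns (nw : PySem.Dict (Option (Int × Int) × Option (Int × Int)) Int)
    (k : Option (Int × Int) × Option (Int × Int)) (v : Int)
    (q : (Option (Int × Int) × Option (Int × Int)) × Int)
    (hq : q ∈ (condIns nw k v).items) : q = (k, v) ∨ q ∈ nw.items := by
  unfold condIns at hq
  split_ifs at hq with hg
  · rcases (PySem.Dict.mem_items_insert nw k v q).mp hq with h | h
    · exact Or.inl h
    · exact Or.inr h.1
  · exact Or.inr hq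

theorem le_getD_stepItem (d e : Int) (nw : PySem.Dict (Option (Int × Int) × Option (Int × Int)) Int)
    (p : (Option (Int × Int) × Option (Int × Int)) × Int) (k : Option (Int × Int) × Option (Int × Int)) :
    nw.getD k (-1) ≤ (stepItem d e nw p).getD k (-1) := by
  unfold stepItem
  cases pyJoin p.1.1 e d with
  | none =>
    cases pyJoin p.1.2 e d with
    | none => exact le_rfl
    | some tb => exact le_getD_condIns nw _ k _
  | some ta =>
    cases pyJoin p.1.2 e d with
    | none => exact le_getD_condIns nw _ k _
    | some tb => exact le_trans (le_getD_condIns nw _ k _) (le_getD_condIns _ _ k _)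

theorem nodup_stepItem (d e : Int) (nw : PySem.Dict (Option (Int × Int) × Option (Int × Int)) Int)
    (p : (Option (Int × Int) × Option (Int × Int)) × Int) (h : nw.keys.Nodup) :
    (stepItem d e nw p).keys.Nodup := by
  unfold stepItem
  cases pyJoin p.1.1 e d with
  | none =>
    cases pyJoin p.1.2 e d with
    | none => exact h
    | some tb => exact nodup_condIns _ _ _ h
  | some ta =>
    cases pyJoin p.1.2 e d with
    | none => exact nodup_condIns _ _ _ h
    | some tb => exact nodup_condIns _ _ _ (nodup_condIns _ _ _ h)

theorem mem_items_stepItem (d e : Int) (nw : PySem.Dict (Option (Int × Int) × Option (Int × Int)) Int)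
    (p : (Option (Int × Int) × Option (Int × Int)) × Int)
    (q : (Option (Int × Int) × Option (Int × Int)) × Int)
    (hq : q ∈ (stepItem d e nw p).items) :
    q ∈ nw.items ∨
      (∃ ta, pyJoin p.1.1 e d = some ta ∧ q = ((some ta, p.1.2), p.2 + 1)) ∨
      (∃ tb, pyJoin p.1.2 e d = some tb ∧ q = ((p.1.1, some tb), p.2 + 1)) := by
  unfold stepItem at hq
  cases hA : pyJoin p.1.1 e d with
  | none =>
    rw [hA] at hq
    cases hB : pyJoin p.1.2 e d with
    | none => rw [hB] at hq; exact Or.inl hq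
    | some tb =>
      rw [hB] at hq
      rcases mem_items_condIns _ _ _ _ hq with h | h
      · exact Or.inr (Or.inr ⟨tb, rfl, h⟩)
      · exact Or.inl h
  | some ta =>
    rw [hA] at hq
    cases hB : pyJoin p.1.2 e d with
    | none =>
      rw [hB] at hq
      rcases mem_items_condIns _ _ _ _ hq with h | h
      · exact Or.inr (Or.inl ⟨ta, rfl, h⟩)
      · exact Or.inl h
    | some tb =>
      rw [hB] at hq
      rcases mem_items_condIns _ _ _ _ hq with h | h
      · exact Or.inr (Or.inr ⟨tb, rfl, h⟩)
      · rcases mem_items_condIns _ _ _ _ h with h' | h'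
        · exact Or.inr (Or.inl ⟨ta, rfl, h'⟩)
        · exact Or.inl h'

theorem getD_stepItem_joinA (d e : Int) (nw : PySem.Dict (Option (Int × Int) × Option (Int × Int)) Int)
    (p : (Option (Int × Int) × Option (Int × Int)) × Int) (ta : Int × Int)
    (h : pyJoin p.1.1 e d = some ta) :
    p.2 + 1 ≤ (stepItem d e nw p).getD (some ta, p.1.2) (-1) := by
  unfold stepItem
  rw [h]
  cases pyJoin p.1.2 e d with
  | none => exact getD_condIns_self nw _ _
  | some tb => exact le_trans (getD_condIns_self nw _ _) (le_getD_condIns _ _ _ _)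

theorem getD_stepItem_joinB (d e : Int) (nw : PySem.Dict (Option (Int × Int) × Option (Int × Int)) Int)
    (p : (Option (Int × Int) × Option (Int × Int)) × Int) (tb : Int × Int)
    (h : pyJoin p.1.2 e d = some tb) :
    p.2 + 1 ≤ (stepItem d e nw p).getD (p.1.1, some tb) (-1) := by
  unfold stepItem
  rw [h]
  cases pyJoin p.1.1 e d with
  | none => exact getD_condIns_self nw _ _
  | some ta => exact getD_condIns_self _ _ _

theorem le_getD_innerFold (d e : Int) (l : List ((Option (Int × Int) × Option (Int × Int)) × Int))
    (nw : PySem.Dict (Option (Int × Int) × Option (Int × Int)) Int)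
    (k : Option (Int × Int) × Option (Int × Int)) :
    nw.getD k (-1) ≤ (l.foldl (stepItem d e) nw).getD k (-1) := by
  induction l generalizing nw with
  | nil => exact le_rfl
  | cons p l ih => exact le_trans (le_getD_stepItem d e nw p k) (ih (stepItem d e nw p))

theorem nodup_innerFold (d e : Int) (l : List ((Option (Int × Int) × Option (Int × Int)) × Int))
    (nw : PySem.Dict (Option (Int × Int) × Option (Int × Int)) Int) (h : nw.keys.Nodup) :
    (l.foldl (stepItem d e) nw).keys.Nodup := by
  induction l generalizing nw with
  | nil => exact h
  | cons p l ih => exact ih (stepItem d e nw p) (nodup_stepItem d e nw p h)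

theorem mem_items_innerFold (d e : Int) (l : List ((Option (Int × Int) × Option (Int × Int)) × Int))
    (nw : PySem.Dict (Option (Int × Int) × Option (Int × Int)) Int)
    (q : (Option (Int × Int) × Option (Int × Int)) × Int)
    (hq : q ∈ (l.foldl (stepItem d e) nw).items) :
    q ∈ nw.items ∨ ∃ p ∈ l,
      (∃ ta, pyJoin p.1.1 e d = some ta ∧ q = ((some ta, p.1.2), p.2 + 1)) ∨
      (∃ tb, pyJoin p.1.2 e d = some tb ∧ q = ((p.1.1, some tb), p.2 + 1)) := by
  induction l generalizing nw with
  | nil => exact Or.inl hq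
  | cons p l ih =>
    rcases ih (stepItem d e nw p) hq with h | ⟨p', hp', h⟩
    · rcases mem_items_stepItem d e nw p q h with h' | h'
      · exact Or.inl h'
      · exact Or.inr ⟨p, List.mem_cons_self, h'⟩
    · exact Or.inr ⟨p', List.mem_cons_of_mem _ hp', h⟩

theorem getD_innerFold_joinA (d e : Int) (l : List ((Option (Int × Int) × Option (Int × Int)) × Int))
    (nw : PySem.Dict (Option (Int × Int) × Option (Int × Int)) Int)
    (p : (Option (Int × Int) × Option (Int × Int)) × Int) (ta : Int × Int)
    (hp : p ∈ l) (h : pyJoin p.1.1 e d = some ta) :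
    p.2 + 1 ≤ (l.foldl (stepItem d e) nw).getD (some ta, p.1.2) (-1) := by
  induction l generalizing nw with
  | nil => cases hp
  | cons q l ih =>
    rcases List.mem_cons.mp hp with h' | h'
    · subst h'
      exact le_trans (getD_stepItem_joinA d e nw p ta h)
        (le_getD_innerFold d e l (stepItem d e nw p) _)
    · exact ih (stepItem d e nw q) h'

theorem getD_innerFold_joinB (d e : Int) (l : List ((Option (Int × Int) × Option (Int × Int)) × Int))
    (nw : PySem.Dict (Option (Int × Int) × Option (Int × Int)) Int)
    (p : (Option (Int × Int) × Option (Int × Int)) × Int) (tb : Int × Int)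
    (hp : p ∈ l) (h : pyJoin p.1.2 e d = some tb) :
    p.2 + 1 ≤ (l.foldl (stepItem d e) nw).getD (p.1.1, some tb) (-1) := by
  induction l generalizing nw with
  | nil => cases hp
  | cons q l ih =>
    rcases List.mem_cons.mp hp with h' | h'
    · subst h'
      exact le_trans (getD_stepItem_joinB d e nw p tb h)
        (le_getD_innerFold d e l (stepItem d e nw p) _)
    · exact ih (stepItem d e nw q) h'

theorem entry_le_bestF (g : Option (Int × Int) × Option (Int × Int) → Int) (m w : Int)
    (nw : PySem.Dict (Option (Int × Int) × Option (Int × Int)) Int)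
    (k : Option (Int × Int) × Option (Int × Int))
    (_hnd : nw.keys.Nodup) (hw : 0 ≤ w) (h : w ≤ nw.getD k (-1)) :
    w + g k ≤ bestF g m nw.items := by
  cases hg : nw.get? k with
  | none =>
    rw [PySem.Dict.getD_of_get?_eq_none nw (-1) hg] at h
    omega
  | some v =>
    rw [PySem.Dict.getD_of_get?_eq_some nw (-1) hg] at h
    have hmem := PySem.Dict.mem_items_of_get?_eq_some nw hg
    have := le_bestF_mem g m nw.items (k, v) hmem
    simp only at this
    omega

theorem bestF_step (d : Int) (states : PySem.Dict (Option (Int × Int) × Option (Int × Int)) Int)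
    (hnd : states.keys.Nodup) (hnn : ∀ p ∈ states.items, 0 ≤ p.2) (e : Int) (r : List Int) (m : Int) :
    bestF (fun k => EvJ d r k.1 k.2) m (stepOuter d states e).items =
      bestF (fun k => EvJ d (e :: r) k.1 k.2) m states.items := by
  unfold stepOuter
  apply le_antisymm
  · apply bestF_le_of
    · intro q hq
      rcases mem_items_innerFold d e states.items states q hq with h | ⟨p, hp, hcase⟩
      · have hmem := le_bestF_mem (fun k => EvJ d (e :: r) k.1 k.2) m states.items q h
        have hs := EvJ_cons_skip d e r q.1.1 q.1.2
        simp only at hmem ⊢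
        omega
      · rcases hcase with ⟨ta, hta, rfl⟩ | ⟨tb, htb, rfl⟩
        · have hmem := le_bestF_mem (fun k => EvJ d (e :: r) k.1 k.2) m states.items p hp
          have hj := EvJ_cons_joinA d e r p.1.1 p.1.2 ta hta
          simp only at hmem ⊢
          omega
        · have hmem := le_bestF_mem (fun k => EvJ d (e :: r) k.1 k.2) m states.items p hp
          have hj := EvJ_cons_joinB d e r p.1.1 p.1.2 tb htb
          simp only at hmem ⊢
          omega
    · exact le_bestF_init _ m _
  · apply bestF_le_of
    · intro p hp
      have hpmem : (p.1, p.2) ∈ states.items := by simpa using hp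
      have hc : states.getD p.1 (-1) = p.2 :=
        PySem.Dict.getD_of_mem_items states hpmem hnd (-1)
      have hp0 : 0 ≤ p.2 := hnn p hp
      show p.2 + EvJ d (e :: r) p.1.1 p.1.2 ≤ _
      apply EvJ_cons_le
      · apply entry_le_bestF _ m p.2 _ p.1 (nodup_innerFold d e states.items states hnd) hp0
        rw [← hc]
        exact le_getD_innerFold d e states.items states p.1
      · intro ta hta
        have hg := getD_innerFold_joinA d e states.items states p ta hp hta
        have := entry_le_bestF (fun k => EvJ d r k.1 k.2) m (p.2 + 1)
          (states.items.foldl (stepItem d e) states) (some ta, p.1.2)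
          (nodup_innerFold d e states.items states hnd) (by omega) hg
        simp only at this
        omega
      · intro tb htb
        have hg := getD_innerFold_joinB d e states.items states p tb hp htb
        have := entry_le_bestF (fun k => EvJ d r k.1 k.2) m (p.2 + 1)
          (states.items.foldl (stepItem d e) states) (p.1.1, some tb)
          (nodup_innerFold d e states.items states hnd) (by omega) hg
        simp only at this
        omega
    · exact le_bestF_init _ m _

theorem nodup_stepOuter (d e : Int) (states : PySem.Dict (Option (Int × Int) × Option (Int × Int)) Int)
    (h : states.keys.Nodup) : (stepOuter d states e).keys.Nodup := by
  exact nodup_innerFold d e states.items states h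

theorem nonneg_stepOuter (d e : Int) (states : PySem.Dict (Option (Int × Int) × Option (Int × Int)) Int)
    (h : ∀ p ∈ states.items, 0 ≤ p.2) : ∀ q ∈ (stepOuter d states e).items, 0 ≤ q.2 := by
  intro q hq
  rcases mem_items_innerFold d e states.items states q hq with h' | ⟨p, hp, hcase⟩
  · exact h q h'
  · have := h p hp
    rcases hcase with ⟨ta, _, rfl⟩ | ⟨tb, _, rfl⟩ <;> simp only <;> omega

theorem bestF_fold (d : Int) (s : List Int) :
    ∀ (states : PySem.Dict (Option (Int × Int) × Option (Int × Int)) Int) (m : Int),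
      states.keys.Nodup → (∀ p ∈ states.items, 0 ≤ p.2) →
      bestF (fun k => EvJ d [] k.1 k.2) m ((s.foldl (stepOuter d) states).items) =
        bestF (fun k => EvJ d s k.1 k.2) m states.items := by
  induction s with
  | nil => intro states m _ _; rfl
  | cons e s ih =>
    intro states m hnd hnn
    rw [List.foldl_cons]
    rw [ih (stepOuter d states e) m (nodup_stepOuter d e states hnd)
      (nonneg_stepOuter d e states hnn)]
    exact bestF_step d states hnd hnn e s m

theorem nonneg_fold (d : Int) (s : List Int)
    (states : PySem.Dict (Option (Int × Int) × Option (Int × Int)) Int)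
    (h : ∀ p ∈ states.items, 0 ≤ p.2) : ∀ q ∈ (s.foldl (stepOuter d) states).items, 0 ≤ q.2 := by
  induction s generalizing states with
  | nil => exact h
  | cons e s ih => exact ih (stepOuter d states e) (nonneg_stepOuter d e states h)

theorem le_getD_fold (d : Int) (s : List Int)
    (states : PySem.Dict (Option (Int × Int) × Option (Int × Int)) Int)
    (k : Option (Int × Int) × Option (Int × Int)) :
    states.getD k (-1) ≤ (s.foldl (stepOuter d) states).getD k (-1) := by
  induction s generalizing states with
  | nil => exact le_rfl
  | cons e s ih =>
    exact le_trans (le_getD_innerFold d e states.items states k) (ih (stepOuter d states e))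

theorem foldl_max_le (l : List Int) (a M : Int) (ha : a ≤ M) (h : ∀ x ∈ l, x ≤ M) :
    l.foldl max a ≤ M := by
  induction l generalizing a with
  | nil => exact ha
  | cons x l ih =>
    exact ih (max a x) (max_le ha (h x (List.mem_cons_self)))
      (fun y hy => h y (List.mem_cons_of_mem _ hy))

theorem max?_getD_eq_foldl (l : List Int) (hne : l ≠ []) (hnn : ∀ x ∈ l, 0 ≤ x) :
    (PySem.List.max? l id).getD 0 = l.foldl max 0 := by
  cases hm : PySem.List.max? l id with
  | none => exact absurd ((PySem.List.max?_eq_none_iff l id).mp hm) hne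
  | some mx =>
    have hmem := PySem.List.max?_mem hm
    have hmax : ∀ y ∈ l, y ≤ mx := by
      intro y hy
      simpa using PySem.List.max?_isMax hm y hy
    simp only [Option.getD_some]
    exact le_antisymm ((PySem.List.le_foldl_max l 0).2 mx hmem)
      (foldl_max_le l 0 mx (hnn mx hmem) hmax)

theorem alt_eq_EvJ (s : List Int) (d : Int) :
    find_max_combination_alt s d = EvJ d s none none := by
  unfold find_max_combination_alt
  simp only []
  set D0 : PySem.Dict (Option (Int × Int) × Option (Int × Int)) Int :=
    PySem.Dict.ofList [((none, none), 0)] with hD0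
  set final := s.foldl (stepOuter d) D0 with hfinal
  have hD0nd : D0.keys.Nodup := PySem.Dict.nodup_keys_ofList _
  have hD0items : D0.items = [((none, none), 0)] := rfl
  have hnn0 : ∀ p ∈ D0.items, 0 ≤ p.2 := by
    rw [hD0items]
    rintro p hp
    rcases List.mem_singleton.mp hp with rfl
    exact le_rfl
  have hnnf := nonneg_fold d s D0 hnn0
  have hgd : (0 : Int) ≤ final.getD (none, none) (-1) := by
    have hmono : D0.getD (none, none) (-1) ≤ final.getD (none, none) (-1) :=
      le_getD_fold d s D0 (none, none)
    have h0 : D0.getD (none, none) (-1) = 0 := rfl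
    omega
  obtain ⟨w, hw⟩ : ∃ w, final.get? (none, none) = some w := by
    cases hg : final.get? (none, none) with
    | none =>
      have := PySem.Dict.getD_of_get?_eq_none final (-1) hg
      omega
    | some w => exact ⟨w, rfl⟩
  have hmem := PySem.Dict.mem_items_of_get?_eq_some final hw
  have hvals : final.values = final.items.map Prod.snd := rfl
  have hvne : final.values ≠ [] := by
    intro hempty
    have hwv : w ∈ final.values := by
      rw [hvals]
      exact List.mem_map_of_mem hmem
    rw [hempty] at hwv
    cases hwv
  have hvnn : ∀ x ∈ final.values, 0 ≤ x := by
    intro x hx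
    rw [hvals] at hx
    obtain ⟨p, hp, rfl⟩ := List.mem_map.mp hx
    exact hnnf p hp
  rw [max?_getD_eq_foldl final.values hvne hvnn]
  have hbf := bestF_fold d s D0 0 hD0nd hnn0
  have hr : bestF (fun k => EvJ d s k.1 k.2) 0 D0.items = EvJ d s none none := by
    rw [hD0items]
    show max 0 (0 + EvJ d s none none) = _
    have := EvJ_nonneg d s none none
    omega
  have hl : bestF (fun k => EvJ d [] k.1 k.2) 0 final.items = final.values.foldl max 0 := by
    show final.items.foldl (fun acc p => max acc (p.2 + EvJ d [] p.1.1 p.1.2)) 0 = _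
    rw [hvals, List.foldl_map]
    simp only [EvJ, add_zero]
  rw [← hl, hbf, hr]

-- ===== VERDICT (by name: the statement is the Claim_ definition above) =====
theorem find_max_combination_spec : Claim_equal_find_max_combination := by
  intro s d _
  unfold Spec_find_max_combination
  rw [alt_eq_EvJ]
  have h := esplora_eq s d 0 [] [] none none (RepSt_nil d) (RepSt_nil d)
  simpa [find_max_combination] using h
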